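-- pv_equiv track=rewrite | github.com/thermofisher-jch/csd-inspector | IonInspector/reports/diagnostics/Raw_Trace_Preview/plots/key_trace.py | get_nuc_flows
-- ===== SOURCE A (Python) =====
-- def get_nuc_flows(target_nuc, key="TCAG", flow_order="TACGTACGTCTGAGCATCGATCGATGTACAGC"):
--     first_incorp_flow = None
--     first_non_incorp_flow = None
--     current_key_nuc = 0
--     for flow_number, flow_nuc in enumerate(flow_order):
--         # If this flow will incorporate
--         if flow_nuc == key[current_key_nuc]:
--             if flow_nuc == target_nuc:
--                 first_incorp_flow = flow_number
--             current_key_nuc += 1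
--             if current_key_nuc >= len(key):
--                 break
--         # If this flow will not
--         elif first_non_incorp_flow is None and flow_nuc == target_nuc:
--             first_non_incorp_flow = flow_number
--
--     return first_incorp_flow, first_non_incorp_flow
-- ===== SOURCE B (Python) =====
-- def get_nuc_flows(target_nuc, key="TCAG", flow_order="TACGTACGTCTGAGCATCGATCGATGTACAGC"):
--     # Phase 1: greedily match key as a subsequence of flow_order, recording the
--     # incorporating flows (index, nuc) and the cutoff after the key completes.
--     incorp = []
--     ki = 0
--     cutoff = len(flow_order)
--     for i, c in enumerate(flow_order):
--         if ki < len(key) and c == key[ki]: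
--             incorp.append((i, c))
--             ki += 1
--             if ki == len(key):
--                 cutoff = i + 1
--                 break
--     # Phase 2: read both answers off the collected data.
--     incorp_idx = {i for i, _ in incorp}
--     first_incorp = next((i for i, c in reversed(incorp) if c == target_nuc), None)
--     first_non_incorp = next(
--         (i for i, c in enumerate(flow_order[:cutoff])
--          if i not in incorp_idx and c == target_nuc),
--         None,
--     )
--     return first_incorp, first_non_incorp
-- ===== Notes on version B (the rewrite author's own statement) =====
-- stated objective: alternative
-- what changed: A's single stateful loop (overwriting first_incorp and guarding first_non_incorp inline) is replaced by a greedy subsequence-match pass that collects the incorporating (index, nuc) pairs and a cutoff, followed by a post-processing phase that reads both answers off the collected data; Pre_ excludes only the inputs (empty key, nonempty flow_order) on which A raises IndexError.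
import Mathlib
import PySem

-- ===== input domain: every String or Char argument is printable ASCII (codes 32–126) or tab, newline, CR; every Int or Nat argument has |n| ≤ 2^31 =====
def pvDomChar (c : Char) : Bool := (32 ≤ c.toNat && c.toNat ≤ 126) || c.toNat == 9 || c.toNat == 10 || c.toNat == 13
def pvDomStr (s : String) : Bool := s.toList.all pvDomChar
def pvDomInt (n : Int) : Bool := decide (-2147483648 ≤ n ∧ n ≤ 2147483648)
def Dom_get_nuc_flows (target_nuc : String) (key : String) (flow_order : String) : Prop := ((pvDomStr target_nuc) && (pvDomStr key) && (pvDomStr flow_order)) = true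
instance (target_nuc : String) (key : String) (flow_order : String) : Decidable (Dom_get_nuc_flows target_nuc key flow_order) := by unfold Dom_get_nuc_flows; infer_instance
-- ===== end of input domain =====

-- B re-decomposes A's single stateful loop into a greedy subsequence-match pass that
-- collects the incorporating flows plus a cutoff, and a post-processing phase that reads
-- both answers off the collected data (objective: alternative decomposition, same cost).

-- ===== PORT A =====
-- A's loop: state (first_incorp, first_non_incorp, current_key_nuc); key[ck] out of
-- range is Python's IndexError (excluded by Pre_), the port stops there.
def pvALoop (tgt : String) (keyC : List Char) :
    List Char → Nat → Option Int → Option Int → Nat → Option Int × Option Int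
  | [], _, fi, fni, _ => (fi, fni)
  | c :: rest, i, fi, fni, ck =>
    match keyC[ck]? with
    | none => (fi, fni)   -- Python raises IndexError here (outside Pre_)
    | some k =>
      if c = k then
        let fi' := if String.mk [c] = tgt then some (i : Int) else fi
        if ck + 1 ≥ keyC.length then (fi', fni)
        else pvALoop tgt keyC rest (i + 1) fi' fni (ck + 1)
      else if fni = none ∧ String.mk [c] = tgt then
        pvALoop tgt keyC rest (i + 1) fi (some (i : Int)) ck
      else pvALoop tgt keyC rest (i + 1) fi fni ck

def get_nuc_flows (target_nuc : String) (key : String) (flow_order : String) : Option Int × Option Int :=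
  pvALoop target_nuc key.toList flow_order.toList 0 none none 0

-- ===== PORT B =====
-- phase 1: greedy subsequence match; returns (incorporating (index, nuc) pairs, cutoff)
def pvGreedy (keyC : List Char) : List Char → Nat → Nat → List (Nat × Char) × Nat
  | [], i, _ => ([], i)
  | c :: rest, i, ki =>
    match keyC[ki]? with
    | none => pvGreedy keyC rest (i + 1) ki
    | some k =>
      if c = k then
        if ki + 1 = keyC.length then ([(i, c)], i + 1)
        else
          let r := pvGreedy keyC rest (i + 1) (ki + 1)
          ((i, c) :: r.1, r.2)
      else pvGreedy keyC rest (i + 1) ki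

-- enumerate(chars) with a Nat counter starting at n
def pvEnum : List Char → Nat → List (Nat × Char)
  | [], _ => []
  | c :: rest, n => (n, c) :: pvEnum rest (n + 1)

def get_nuc_flows_alt (target_nuc : String) (key : String) (flow_order : String) : Option Int × Option Int :=
  let r := pvGreedy key.toList flow_order.toList 0 0
  let incIdx := PySem.Set.ofList (r.1.map Prod.fst)
  let fi := (r.1.reverse.find? (fun p => String.mk [p.2] == target_nuc)).map (fun p => (p.1 : Int))
  let fni := ((pvEnum (flow_order.toList.take r.2) 0).find?
      (fun p => !(PySem.Set.contains incIdx p.1) && (String.mk [p.2] == target_nuc))).map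
      (fun p => (p.1 : Int))
  (fi, fni)

-- ===== PRECONDITION & SPEC =====
-- Pre_ excludes exactly the inputs where A raises IndexError (empty key with a nonempty
-- flow_order: key[0] is evaluated on the first loop iteration).
def Pre_get_nuc_flows (target_nuc : String) (key : String) (flow_order : String) : Prop :=
  flow_order = "" ∨ key ≠ ""
instance (target_nuc : String) (key : String) (flow_order : String) : Decidable (Pre_get_nuc_flows target_nuc key flow_order) := by unfold Pre_get_nuc_flows; infer_instance
def pvWitness_get_nuc_flows : String × String × String := ("T", "TCAG", "TACGTACGTC")

def Spec_get_nuc_flows (target_nuc : String) (key : String) (flow_order : String) (out : Option Int × Option Int) : Prop := out = get_nuc_flows_alt target_nuc key flow_order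
instance (target_nuc : String) (key : String) (flow_order : String) (out : Option Int × Option Int) : Decidable (Spec_get_nuc_flows target_nuc key flow_order out) := by unfold Spec_get_nuc_flows; infer_instance

-- ===== CLAIM (what is proved, stated in full; the proofs are below) =====
def Claim_equal_get_nuc_flows : Prop := ∀ (target_nuc : String) (key : String) (flow_order : String), Dom_get_nuc_flows target_nuc key flow_order → Pre_get_nuc_flows target_nuc key flow_order → Spec_get_nuc_flows target_nuc key flow_order (get_nuc_flows target_nuc key flow_order)

-- ===== LEMMAS AND PROOFS =====

theorem pv_find?_congr {α : Type} (p q : α → Bool) :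
    ∀ (l : List α), (∀ x ∈ l, p x = q x) → l.find? p = l.find? q := by
  intro l
  induction l with
  | nil => intro _; rfl
  | cons a t ih =>
    intro h
    simp only [List.find?]
    rw [h a (by simp)]
    cases q a
    · exact ih (fun x hx => h x (by simp [hx]))
    · rfl

theorem pv_cut_ge (keyC : List Char) :
    ∀ (l : List Char) (i ki : Nat), i ≤ (pvGreedy keyC l i ki).2 := by
  intro l
  induction l with
  | nil => intro i ki; simp [pvGreedy]
  | cons c rest ih =>
    intro i ki
    simp only [pvGreedy]
    cases h : keyC[ki]? with
    | none => exact le_trans (by omega) (ih (i+1) ki)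
    | some k =>
      by_cases hc : c = k <;> simp [hc]
      · by_cases hk : ki + 1 = keyC.length <;> simp [hk]
        exact le_trans (by omega) (ih (i+1) (ki+1))
      · exact le_trans (by omega) (ih (i+1) ki)

theorem pv_inc_ge (keyC : List Char) :
    ∀ (l : List Char) (i ki : Nat), ∀ p ∈ (pvGreedy keyC l i ki).1, i ≤ p.1 := by
  intro l
  induction l with
  | nil => intro i ki p hp; simp [pvGreedy] at hp
  | cons c rest ih =>
    intro i ki p hp
    simp only [pvGreedy] at hp
    cases h : keyC[ki]? with
    | none => rw [h] at hp; exact le_trans (by omega) (ih (i+1) ki p hp)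
    | some k =>
      rw [h] at hp
      by_cases hc : c = k <;> simp [hc] at hp
      · by_cases hk : ki + 1 = keyC.length <;> simp [hk] at hp
        · simp [hp]
        · rcases hp with hp | hp
          · simp [hp]
          · exact le_trans (by omega) (ih (i+1) (ki+1) p hp)
      · exact le_trans (by omega) (ih (i+1) ki p hp)

theorem pv_enum_ge : ∀ (l : List Char) (n : Nat), ∀ p ∈ pvEnum l n, n ≤ p.1 := by
  intro l
  induction l with
  | nil => intro n p hp; simp [pvEnum] at hp
  | cons c rest ih =>
    intro n p hp
    simp only [pvEnum, List.mem_cons] at hp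
    rcases hp with hp | hp
    · simp [hp]
    · exact le_trans (by omega) (ih (n+1) p hp)

-- the combined "phase 2" read-off, parametric in the loop state, used for the induction
def pvPost (tgt : String) (l : List Char) (i : Nat) (fi fni : Option Int)
    (r : List (Nat × Char) × Nat) : Option Int × Option Int :=
  ( (r.1.reverse.find? (fun p => String.mk [p.2] == tgt)).elim fi (fun p => some (p.1 : Int)),
    fni.elim
      (((pvEnum (l.take (r.2 - i)) i).find?
          (fun p => !((r.1.map Prod.fst).contains p.1) && (String.mk [p.2] == tgt))).map
        (fun p => (p.1 : Int)))
      (fun x => some x) )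

theorem pv_main (tgt : String) (keyC : List Char) :
    ∀ (l : List Char) (i ki : Nat) (fi fni : Option Int), ki < keyC.length →
      pvALoop tgt keyC l i fi fni ki = pvPost tgt l i fi fni (pvGreedy keyC l i ki) := by
  intro l
  induction l with
  | nil =>
    intro i ki fi fni _
    simp only [pvALoop, pvGreedy, pvPost, List.reverse_nil, List.find?_nil, Option.elim,
      Nat.sub_self, List.take_zero]
    cases fni <;> rfl
  | cons c rest ih =>
    intro i ki fi fni hki
    have hk : keyC[ki]? = some keyC[ki] := List.getElem?_eq_getElem hki
    simp only [pvALoop, pvGreedy, hk]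
    by_cases hc : c = keyC[ki]
    · subst hc
      simp only [eq_self_iff_true, if_true]
      by_cases hdone : ki + 1 ≥ keyC.length
      · have hlen : ki + 1 = keyC.length := by omega
        simp only [if_pos hdone, if_pos hlen]
        refine Prod.ext_iff.mpr ⟨?_, ?_⟩
        · simp only [pvPost, List.reverse_cons, List.reverse_nil, List.nil_append]
          by_cases ht : String.mk [keyC[ki]] = tgt
          · rw [List.find?_cons_of_pos (by simp [ht])]
            simp [ht]
          · rw [List.find?_cons_of_neg (by simp [ht])]
            simp [ht, List.find?]
        · simp only [pvPost, Nat.add_sub_cancel_left, List.take_succ_cons, List.take_zero, pvEnum]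
          rw [List.find?_cons_of_neg (by simp)]
          cases fni <;> simp [List.find?]
      · have hlt : ki + 1 < keyC.length := by omega
        simp only [if_neg hdone, if_neg (show ¬ ki + 1 = keyC.length by omega)]
        rw [ih (i+1) (ki+1) _ fni hlt]
        set r := pvGreedy keyC rest (i+1) (ki+1) with hr
        have hcut : i + 1 ≤ r.2 := by rw [hr]; exact pv_cut_ge keyC rest (i+1) (ki+1)
        refine Prod.ext_iff.mpr ⟨?_, ?_⟩
        · simp only [pvPost, List.reverse_cons, List.find?_append]
          cases hfind : r.1.reverse.find? (fun p => String.mk [p.2] == tgt) with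
          | some p => simp [Option.or]
          | none =>
            simp only [Option.or]
            by_cases ht : String.mk [keyC[ki]] = tgt
            · rw [List.find?_cons_of_pos (by simp [ht])]
              simp [ht]
            · rw [List.find?_cons_of_neg (by simp [ht])]
              simp [ht, List.find?]
        · cases fni with
          | some x => rfl
          | none =>
            simp only [pvPost, Option.elim]
            have h1 : r.2 - i = (r.2 - (i+1)) + 1 := by omega
            rw [h1, List.take_succ_cons]
            simp only [pvEnum]
            rw [List.find?_cons_of_neg (by simp)]
            congr 1
            apply pv_find?_congr
            intro p hp
            have hpge : i + 1 ≤ p.1 := pv_enum_ge _ (i+1) p hp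
            simp only [List.map_cons, List.contains_cons]
            have hne : (p.1 == i) = false := by
              simp only [beq_eq_false_iff_ne]; omega
            rw [hne]
            simp
    · simp only [if_neg hc]
      have tailEq : ∀ fni', pvALoop tgt keyC rest (i+1) fi fni' ki
          = pvPost tgt rest (i+1) fi fni' (pvGreedy keyC rest (i+1) ki) := by
        intro fni'; exact ih (i+1) ki fi fni' hki
      set r := pvGreedy keyC rest (i+1) ki with hr
      have hcut : i + 1 ≤ r.2 := by rw [hr]; exact pv_cut_ge keyC rest (i+1) ki
      have hinc : ∀ p ∈ r.1, i + 1 ≤ p.1 := by rw [hr]; exact pv_inc_ge keyC rest (i+1) ki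
      have hexp : pvPost tgt (c :: rest) i fi fni r
          = ((r.1.reverse.find? (fun p => String.mk [p.2] == tgt)).elim fi (fun p => some (p.1 : Int)),
             fni.elim
               ((((i, c) :: pvEnum (rest.take (r.2 - (i+1))) (i+1)).find?
                   (fun p => !((r.1.map Prod.fst).contains p.1) && (String.mk [p.2] == tgt))).map
                 (fun p => (p.1 : Int)))
               (fun x => some x)) := by
        simp only [pvPost]
        have h1 : r.2 - i = (r.2 - (i+1)) + 1 := by omega
        rw [h1, List.take_succ_cons]
        rfl
      rw [hexp]
      have hheadmem : ((r.1.map Prod.fst).contains i) = false := by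
        simp only [List.contains_eq_mem, decide_eq_false_iff_not, List.mem_map]
        rintro ⟨p, hp, hpi⟩
        have := hinc p hp; omega
      by_cases hfni : fni = none
      · subst hfni
        by_cases ht : String.mk [c] = tgt
        · rw [if_pos ⟨rfl, ht⟩, tailEq (some i)]
          refine Prod.ext_iff.mpr ⟨rfl, ?_⟩
          rw [List.find?_cons_of_pos (by rw [hheadmem]; simp [ht])]
          rfl
        · rw [if_neg (by simp [ht]), tailEq none]
          refine Prod.ext_iff.mpr ⟨rfl, ?_⟩
          rw [List.find?_cons_of_neg (by simp [ht])]
          rfl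
      · rcases Option.ne_none_iff_exists'.mp hfni with ⟨x, hx⟩
        subst hx
        rw [if_neg (by simp), tailEq (some x)]
        rfl

theorem pv_contains_ofList (m : List Nat) (x : Nat) :
    PySem.Set.contains (PySem.Set.ofList m) x = m.contains x := by
  by_cases hm : x ∈ m
  · simp [PySem.Set.contains, List.contains_eq_mem, hm, (PySem.Set.mem_ofList m x).mpr hm]
  · have h2 : x ∉ PySem.Set.ofList m := fun hc => hm ((PySem.Set.mem_ofList m x).mp hc)
    simp [PySem.Set.contains, List.contains_eq_mem, hm, h2]

-- ===== VERDICT (by name: the statement is the Claim_ definition above) =====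
theorem get_nuc_flows_spec : Claim_equal_get_nuc_flows := by
  intro tgt key fo _ hpre
  unfold Spec_get_nuc_flows get_nuc_flows get_nuc_flows_alt
  rcases hpre with hfo | hkey
  · subst hfo
    simp [pvALoop, pvGreedy, pvEnum]
  · have hklen : 0 < key.toList.length := by
      cases hl : key.toList with
      | nil => exact absurd (by simpa [String.ofList_toList] using congrArg String.ofList hl) hkey
      | cons a t => simp
    rw [pv_main tgt key.toList fo.toList 0 0 none none hklen]
    simp only [pvPost, Nat.sub_zero]
    refine Prod.ext_iff.mpr ⟨?_, ?_⟩
    · cases hf : (pvGreedy key.toList fo.toList 0 0).1.reverse.find?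
        (fun p => String.mk [p.2] == tgt) with
      | none => simp [hf]
      | some p => simp [hf]
    · simp only [Option.elim]
      congr 1
      apply pv_find?_congr
      intro p _
      rw [pv_contains_ofList]
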